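-- pv_equiv track=rewrite | github.com/JohnSunny21/python-daily-coding | FreeCodeCamp/CodingQ/SmallestGap.py | smallest_gap
-- ===== SOURCE A (Python) =====
-- def smallest_gap(s):
--
--     last_seen = {}  # Stores the most recent index of each character
--     min_gap = len(s) # Initialize with maximum possible gap
--     result = ""
--
--
--     for i, ch in enumerate(s):
--
--         # If the character was seen before,
--         # compute the gap between current index and previous index
--         if ch in last_seen:
--
--             gap = i - last_seen[ch] - 1
--
--             # Update smallest gap and substring if this gap is smaller
--             if gap < min_gap:
--                 min_gap = gap
--                 result = s[last_seen[ch]+1 : i]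
--
--         # Always update the last seen index
--         last_seen[ch] = i
--
--     return result
-- ===== SOURCE B (Python) =====
-- def smallest_gap(s):
--     # Group all occurrence indices per character in one pass,
--     # then scan each character's consecutive occurrence pairs,
--     # keeping the (gap, ending index)-lexicographically smallest pair.
--     positions = {}
--     for i, ch in enumerate(s):
--         positions.setdefault(ch, []).append(i)
--     best = None  # (gap, cur, prev)
--     for idx_list in positions.values():
--         for prev, cur in zip(idx_list, idx_list[1:]):
--             gap = cur - prev - 1
--             if best is None or gap < best[0] or (gap == best[0] and cur < best[1]):
--                 best = (gap, cur, prev)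
--     if best is None:
--         return ""
--     return s[best[2] + 1 : best[1]]
-- ===== Notes on version B (the rewrite author's own statement) =====
-- stated objective: alternative
-- what changed: Instead of scanning with a running last-seen dict and updating the best substring in-flight, B first groups all occurrence indices per character, then takes the (gap, ending-index)-lexicographic minimum over each character's consecutive occurrence pairs and slices once at the end.
import Mathlib
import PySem

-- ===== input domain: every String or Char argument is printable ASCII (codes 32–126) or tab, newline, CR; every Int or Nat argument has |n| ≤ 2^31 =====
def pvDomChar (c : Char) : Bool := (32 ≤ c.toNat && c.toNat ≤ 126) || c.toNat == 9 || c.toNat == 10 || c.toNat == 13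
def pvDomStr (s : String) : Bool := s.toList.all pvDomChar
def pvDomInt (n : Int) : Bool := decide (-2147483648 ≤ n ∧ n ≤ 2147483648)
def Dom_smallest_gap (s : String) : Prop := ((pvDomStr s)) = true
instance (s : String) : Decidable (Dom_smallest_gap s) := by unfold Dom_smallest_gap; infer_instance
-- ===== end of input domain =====

-- B groups occurrence indices per character once, then takes the (gap, ending-index)-lexicographic
-- minimum over consecutive occurrence pairs — a different decomposition of the same task (objective: alternative).

-- ===== PORT A =====
-- one loop step of A: check the last-seen dict, maybe improve (min_gap, result), record index
def sgStepA (s : String) (st : PySem.Dict Char Int × Int × String) (p : Int × Char) :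
    PySem.Dict Char Int × Int × String :=
  let mr : Int × String :=
    match st.1.get? p.2 with
    | some j =>
        let gap := p.1 - j - 1
        if gap < st.2.1 then (gap, PySem.Str.slice s (some (j + 1)) (some p.1))
        else (st.2.1, st.2.2)
    | none => (st.2.1, st.2.2)
  (st.1.insert p.2 p.1, mr)

def smallest_gap (s : String) : String :=
  ((PySem.List.enumerate s.toList 0).foldl (sgStepA s)
    (PySem.Dict.empty, PySem.Str.len s, "")).2.2

-- ===== PORT B =====
-- positions = {ch: [all indices of ch, ascending]}
def sgPositions (s : String) : PySem.Dict Char (List Int) :=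
  (PySem.List.enumerate s.toList 0).foldl
    (fun d p => d.modify p.2 [] (fun xs => xs ++ [p.1])) PySem.Dict.empty

-- lexicographic (gap, ending index) minimum update over one candidate pair (prev, cur)
def sgBestStep (b : Option (Int × Int × Int)) (pc : Int × Int) : Option (Int × Int × Int) :=
  let gap := pc.2 - pc.1 - 1
  match b with
  | none => some (gap, pc.2, pc.1)
  | some r =>
    if gap < r.1 ∨ (gap = r.1 ∧ pc.2 < r.2.1) then some (gap, pc.2, pc.1)
    else some r

def sgBest (s : String) : Option (Int × Int × Int) :=
  (sgPositions s).values.foldl (fun b idxs => (idxs.zip idxs.tail).foldl sgBestStep b) none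

def smallest_gap_alt (s : String) : String :=
  match sgBest s with
  | none => ""
  | some r => PySem.Str.slice s (some (r.2.2 + 1)) (some r.2.1)

-- ===== PRECONDITION & SPEC =====
def Spec_smallest_gap (s : String) (out : String) : Prop := out = smallest_gap_alt s
instance (s : String) (out : String) : Decidable (Spec_smallest_gap s out) := by unfold Spec_smallest_gap; infer_instance

-- ===== CLAIM (what is proved, stated in full; the proofs are below) =====
def Claim_equal_smallest_gap : Prop := ∀ (s : String), Dom_smallest_gap s → Spec_smallest_gap s (smallest_gap s)

-- ===== LEMMAS AND PROOFS =====

-- (p, c) is a candidate: two occurrences of the same character with no closer occurrence between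
def IsCand (l : List Char) (p c : Nat) : Prop :=
  p < c ∧ c < l.length ∧ l[p]? = l[c]? ∧ ∀ q : Nat, p < q → q < c → l[q]? ≠ l[c]?

def NoCand (l : List Char) (k : Nat) : Prop := ∀ p c : Nat, c < k → ¬ IsCand l p c

-- (g, c, p) is the (gap, ending index)-lexicographically least candidate ending before k
def CandMin (l : List Char) (k : Nat) (g : Int) (c p : Nat) : Prop :=
  IsCand l p c ∧ c < k ∧ g = (c : Int) - (p : Int) - 1 ∧
  ∀ p' c' : Nat, IsCand l p' c' → c' < k →
    g < (c' : Int) - (p' : Int) - 1 ∨ (g = (c' : Int) - (p' : Int) - 1 ∧ c ≤ c')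

lemma prev_unique {l : List Char} {p p' c : Nat} (h : IsCand l p c) (h' : IsCand l p' c) :
    p = p' := by
  rcases lt_trichotomy p p' with hlt | he | hgt
  · exact absurd h'.2.2.1 (h.2.2.2 p' hlt h'.1)
  · exact he
  · exact absurd h.2.2.1 (h'.2.2.2 p hgt h.1)

lemma CandMin_unique {l : List Char} {k : Nat} {g g' : Int} {c c' p p' : Nat}
    (h : CandMin l k g c p) (h' : CandMin l k g' c' p') : g = g' ∧ c = c' ∧ p = p' := by
  have h1 := h.2.2.2 p' c' h'.1 h'.2.1
  have h2 := h'.2.2.2 p c h.1 h.2.1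
  have hg := h.2.2.1
  have hg' := h'.2.2.1
  have hcc : c = c' := by omega
  subst hcc
  have hp := prev_unique h.1 h'.1
  exact ⟨by omega, rfl, hp⟩

-- --- A side ---
def lastBelow (l : List Char) : Nat → Char → Option Nat
  | 0, _ => none
  | (k+1), ch => if l[k]? = some ch then some k else lastBelow l k ch

lemma lastBelow_some {l : List Char} {k : Nat} {ch : Char} {j : Nat}
    (h : lastBelow l k ch = some j) :
    j < k ∧ l[j]? = some ch ∧ ∀ q : Nat, j < q → q < k → l[q]? ≠ some ch := by
  induction k with
  | zero => simp [lastBelow] at h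
  | succ k ih =>
    unfold lastBelow at h
    split at h
    · rename_i hk
      obtain rfl : j = k := by simpa using h.symm
      exact ⟨Nat.lt_succ_self _, hk, fun q hq1 hq2 _ => by omega⟩
    · rename_i hk
      obtain ⟨hj, hl, hq⟩ := ih h
      refine ⟨by omega, hl, fun q hq1 hq2 => ?_⟩
      rcases Nat.lt_or_ge q k with hqk | hqk
      · exact hq q hq1 hqk
      · obtain rfl : q = k := by omega
        exact hk

lemma lastBelow_none {l : List Char} {k : Nat} {ch : Char}
    (h : lastBelow l k ch = none) : ∀ j : Nat, j < k → l[j]? ≠ some ch := by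
  induction k with
  | zero => omega
  | succ k ih =>
    unfold lastBelow at h
    split at h
    · exact absurd h (by simp)
    · rename_i hk
      intro j hj
      rcases Nat.lt_or_ge j k with hjk | hjk
      · exact ih h j hjk
      · obtain rfl : j = k := by omega
        exact hk

-- invariant on A's (min_gap, result) after scanning the first k characters
def StSpec (s : String) (l : List Char) (k : Nat) (mg : Int) (res : String) : Prop :=
  (NoCand l k ∧ mg = (l.length : Int) ∧ res = "")
  ∨ ∃ g c p, CandMin l k g c p ∧ mg = g ∧
      res = PySem.Str.slice s (some ((p : Int) + 1)) (some (c : Int))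

lemma StSpec_ge {s : String} {l : List Char} {k : Nat} {mg : Int} {res : String}
    (hk : l.length ≤ k) (h : StSpec s l k mg res) : StSpec s l l.length mg res := by
  rcases h with ⟨hnc, h1, h2⟩ | ⟨g, c, p, hcm, h1, h2⟩
  · exact Or.inl ⟨fun p c hc => hnc p c (by omega), h1, h2⟩
  · exact Or.inr ⟨g, c, p, ⟨hcm.1, hcm.1.2.1, hcm.2.2.1,
      fun p' c' hic _ => hcm.2.2.2 p' c' hic (by omega)⟩, h1, h2⟩

lemma A_loop (s : String) : ∀ (rest l : List Char) (k : Nat) (ls : PySem.Dict Char Int)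
    (mg : Int) (res : String),
    l.drop k = rest →
    (∀ ch, ls.get? ch = (lastBelow l k ch).map (fun j => (j : Int))) →
    StSpec s l k mg res →
    StSpec s l l.length
      ((PySem.List.enumerate rest (k : Int)).foldl (sgStepA s) (ls, mg, res)).2.1
      ((PySem.List.enumerate rest (k : Int)).foldl (sgStepA s) (ls, mg, res)).2.2 := by
  intro rest
  induction rest with
  | nil =>
    intro l k ls mg res hd hls hst
    rw [PySem.List.enumerate_nil, List.foldl_nil]
    exact StSpec_ge (List.drop_eq_nil_iff.mp hd) hst
  | cons ch0 rest' ih =>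
    intro l k ls mg res hd hls hst
    have hk : k < l.length := by
      by_contra hge
      rw [List.drop_eq_nil_of_le (by omega)] at hd
      simp at hd
    have hget : l[k]? = some ch0 := by
      have h0 : (l.drop k)[0]? = l[k]? := by simp
      rw [hd] at h0
      simpa using h0.symm
    have hd' : l.drop (k + 1) = rest' := by
      have ht : (l.drop k).tail = l.drop (k + 1) := List.tail_drop ..
      rw [hd] at ht
      simpa using ht.symm
    rw [PySem.List.enumerate_cons, List.foldl_cons]
    have hcast : ((k : Int) + 1) = ((k + 1 : Nat) : Int) := by push_cast; ring
    rw [hcast]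
    -- the dictionary invariant after the unconditional insert
    have hinv' : ∀ ch, (ls.insert ch0 (k : Int)).get? ch =
        (lastBelow l (k + 1) ch).map (fun j => (j : Int)) := by
      intro ch
      rw [PySem.Dict.get?_insert]
      have hlb1 : lastBelow l (k + 1) ch =
          if l[k]? = some ch then some k else lastBelow l k ch := rfl
      rw [hlb1, hget]
      by_cases hch : ch = ch0
      · subst hch
        simp
      · have h1 : ¬ (some ch0 = some ch) := by simpa using fun h => hch h.symm
        simp [hch, h1, hls ch]
    cases hlb : lastBelow l k ch0 with
    | none =>
      have hstep : sgStepA s (ls, mg, res) ((k : Int), ch0) =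
          (ls.insert ch0 (k : Int), mg, res) := by
        simp [sgStepA, hls ch0, hlb]
      rw [hstep]
      have hnoK : ∀ p, ¬ IsCand l p k := by
        intro p hic
        have hpl : l[p]? = some ch0 := by rw [hic.2.2.1, hget]
        exact lastBelow_none hlb p hic.1 hpl
      refine ih l (k + 1) _ mg res hd' hinv' ?_
      rcases hst with ⟨hnc, h1, h2⟩ | ⟨g, c, p, hcm, h1, h2⟩
      · refine Or.inl ⟨?_, h1, h2⟩
        intro p c hc hic
        rcases Nat.lt_or_ge c k with h | h
        · exact hnc p c h hic
        · have : c = k := by omega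
          exact hnoK p (this ▸ hic)
      · refine Or.inr ⟨g, c, p, ⟨hcm.1, Nat.lt_succ_of_lt hcm.2.1, hcm.2.2.1, ?_⟩, h1, h2⟩
        intro p' c' hic hlt
        rcases Nat.lt_or_ge c' k with h | h
        · exact hcm.2.2.2 p' c' hic h
        · have : c' = k := by omega
          exact absurd (this ▸ hic) (hnoK p')
    | some jn =>
      obtain ⟨hjk, hjl, hbet⟩ := lastBelow_some hlb
      have candK : IsCand l jn k :=
        ⟨hjk, hk, by rw [hjl, hget], fun q h1 h2 => by rw [hget]; exact hbet q h1 h2⟩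
      by_cases hif : (k : Int) - (jn : Int) - 1 < mg
      · have hstep : sgStepA s (ls, mg, res) ((k : Int), ch0) =
            (ls.insert ch0 (k : Int), (k : Int) - (jn : Int) - 1,
              PySem.Str.slice s (some ((jn : Int) + 1)) (some (k : Int))) := by
          simp [sgStepA, hls ch0, hlb, hif]
        rw [hstep]
        refine ih l (k + 1) _ _ _ hd' hinv' ?_
        refine Or.inr ⟨(k : Int) - (jn : Int) - 1, k, jn, ⟨candK, by omega, rfl, ?_⟩, rfl, rfl⟩
        intro p' c' hic hlt
        rcases Nat.lt_or_ge c' k with h | h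
        · rcases hst with ⟨hnc, h1, h2⟩ | ⟨g, c, p, hcm, h1, h2⟩
          · exact absurd hic (hnc p' c' h)
          · have hmin := hcm.2.2.2 p' c' hic h
            have hge : g ≤ (c' : Int) - (p' : Int) - 1 := by
              rcases hmin with h' | ⟨h'1, h'2⟩ <;> omega
            left; omega
        · have hck : c' = k := by omega
          subst hck
          have hpj : p' = jn := prev_unique hic candK
          subst hpj
          exact Or.inr ⟨rfl, le_refl _⟩
      · have hstep : sgStepA s (ls, mg, res) ((k : Int), ch0) =
            (ls.insert ch0 (k : Int), mg, res) := by
          simp [sgStepA, hls ch0, hlb, hif]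
        rw [hstep]
        refine ih l (k + 1) _ mg res hd' hinv' ?_
        rcases hst with ⟨hnc, h1, h2⟩ | ⟨g, c, p, hcm, h1, h2⟩
        · exact absurd (show (k : Int) - (jn : Int) - 1 < mg by omega) hif
        · refine Or.inr ⟨g, c, p, ⟨hcm.1, Nat.lt_succ_of_lt hcm.2.1, hcm.2.2.1, ?_⟩, h1, h2⟩
          intro p' c' hic hlt
          rcases Nat.lt_or_ge c' k with h | h
          · exact hcm.2.2.2 p' c' hic h
          · have hck : c' = k := by omega
            have hpj : p' = jn := prev_unique (hck ▸ hic) candK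
            have hg : g = mg := h1.symm
            have hck2 : c < k := hcm.2.1
            by_cases hgg : g < (c' : Int) - (p' : Int) - 1
            · exact Or.inl hgg
            · refine Or.inr ⟨by omega, by omega⟩

lemma A_char (s : String) :
    ∃ mg, StSpec s s.toList s.toList.length mg (smallest_gap s) := by
  have hdict : ∀ ch, (PySem.Dict.empty : PySem.Dict Char Int).get? ch =
      (lastBelow s.toList 0 ch).map (fun j => (j : Int)) := by
    intro ch
    simp [lastBelow, PySem.Dict.get?_empty]
  have hst : StSpec s s.toList 0 (PySem.Str.len s) "" :=
    Or.inl ⟨fun p c hc => (Nat.not_lt_zero c hc).elim, by simp [PySem.Str.len_eq], rfl⟩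
  have h := A_loop s s.toList s.toList 0 PySem.Dict.empty (PySem.Str.len s) "" rfl hdict hst
  exact ⟨_, by simpa [smallest_gap] using h⟩

-- --- B side ---
def sgOcc (tl : List Char) (ch : Char) : List Int :=
  (((PySem.List.enumerate tl 0).map Prod.swap).filter (fun q => q.1 == ch)).map (·.2)

lemma positions_getD (s : String) (ch : Char) :
    (sgPositions s).getD ch [] = sgOcc s.toList ch := by
  have h : (PySem.List.enumerate s.toList 0).foldl
      (fun d p => d.modify p.2 [] (fun xs => xs ++ [p.1]))
        (PySem.Dict.empty : PySem.Dict Char (List Int))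
    = ((PySem.List.enumerate s.toList 0).map Prod.swap).foldl
      (fun d q => d.modify q.1 [] (fun xs => xs ++ [q.2])) PySem.Dict.empty := by
    rw [List.foldl_map]
    rfl
  unfold sgPositions
  rw [h, PySem.Dict.getD_foldl_modify_append]
  simp [sgOcc, PySem.Dict.getD_empty]

lemma mem_sgOcc {tl : List Char} {ch : Char} {x : Int} :
    x ∈ sgOcc tl ch ↔ ∃ m : Nat, x = (m : Int) ∧ m < tl.length ∧ tl[m]? = some ch := by
  simp only [sgOcc, List.mem_map, List.mem_filter, PySem.List.mem_enumerate_iff]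
  constructor
  · rintro ⟨q, ⟨⟨p, ⟨m, hm, rfl⟩, rfl⟩, hq⟩, rfl⟩
    simp only [Prod.swap, beq_iff_eq] at hq ⊢
    exact ⟨m, by simp, hm, by simp [List.getElem?_eq_getElem hm, hq]⟩
  · rintro ⟨m, rfl, hm, hch⟩
    rw [List.getElem?_eq_getElem hm] at hch
    refine ⟨(tl[m], (m : Int)), ⟨⟨((m : Int), tl[m]), ⟨m, hm, by simp⟩, rfl⟩, ?_⟩, rfl⟩
    simpa using Option.some.inj hch

lemma sgOcc_pairwise (tl : List Char) (ch : Char) : (sgOcc tl ch).Pairwise (· < ·) := by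
  have h := PySem.List.pairwise_lt_enumerate tl (0 : Int)
  unfold sgOcc
  rw [List.pairwise_map]
  refine List.Pairwise.sublist List.filter_sublist ?_
  rw [List.pairwise_map]
  exact h

lemma mem_zip_tail_iff {xs : List Int} (hx : xs.Pairwise (· < ·)) {a b : Int} :
    (a, b) ∈ xs.zip xs.tail ↔
      a ∈ xs ∧ b ∈ xs ∧ a < b ∧ ∀ x ∈ xs, ¬(a < x ∧ x < b) := by
  induction xs with
  | nil => simp
  | cons x xs ih =>
    cases xs with
    | nil =>
      simp only [List.tail_cons, List.zip_nil_right, List.not_mem_nil, false_iff]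
      rintro ⟨ha, hb, hab, -⟩
      simp at ha hb
      omega
    | cons y t =>
      have hx1 : ∀ z ∈ y :: t, x < z := fun z hz => (List.pairwise_cons.mp hx).1 z hz
      have hx2 : (y :: t).Pairwise (· < ·) := (List.pairwise_cons.mp hx).2
      have hyt : ∀ z ∈ t, y < z := fun z hz => (List.pairwise_cons.mp hx2).1 z hz
      constructor
      · intro h
        rcases List.mem_cons.mp h with heq | hmem
        · obtain ⟨rfl, rfl⟩ := Prod.mk.inj heq
          refine ⟨List.mem_cons_self .., List.mem_cons_of_mem _ (List.mem_cons_self ..),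
            hx1 b (List.mem_cons_self ..), ?_⟩
          intro z hz hzb
          rcases List.mem_cons.mp hz with rfl | hz'
          · omega
          · rcases List.mem_cons.mp hz' with rfl | hz''
            · omega
            · exact absurd hzb.2 (by have := hyt z hz''; omega)
        · obtain ⟨ha, hb, hab, hbet⟩ := (ih hx2).mp hmem
          refine ⟨List.mem_cons_of_mem _ ha, List.mem_cons_of_mem _ hb, hab, ?_⟩
          intro z hz hzb
          rcases List.mem_cons.mp hz with rfl | hz'
          · exact absurd hzb.1 (by have := hx1 a ha; omega)
          · exact hbet z hz' hzb
      · rintro ⟨ha, hb, hab, hbet⟩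
        rcases List.mem_cons.mp ha with rfl | ha'
        · have hb' : b ∈ y :: t := by
            rcases List.mem_cons.mp hb with rfl | hb' <;> [omega; exact hb']
          have hby : b = y := by
            rcases List.mem_cons.mp hb' with rfl | hb'' 
            · rfl
            · exact absurd ⟨hx1 y (List.mem_cons_self ..), hyt b hb''⟩
                (hbet y (List.mem_cons_of_mem _ (List.mem_cons_self ..)))
          subst hby
          exact List.mem_cons_self ..
        · have hb' : b ∈ y :: t := by
            rcases List.mem_cons.mp hb with rfl | hb''
            · exact absurd hab (by have := hx1 a ha'; omega)
            · exact hb''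
          refine List.mem_cons_of_mem _ ((ih hx2).mpr ⟨ha', hb', hab, ?_⟩)
          exact fun z hz => hbet z (List.mem_cons_of_mem _ hz)

def sgCandL (s : String) : List (Int × Int) :=
  (sgPositions s).keys.flatMap (fun ch => (sgOcc s.toList ch).zip (sgOcc s.toList ch).tail)

lemma sgBest_eq_fold_candL (s : String) :
    sgBest s = (sgCandL s).foldl sgBestStep none := by
  have hnd : (sgPositions s).keys.Nodup := by
    unfold sgPositions
    exact PySem.Dict.nodup_keys_foldl_modify_key _ _ _ _ _ (by simp)
  unfold sgBest sgCandL
  rw [PySem.Dict.values_eq_map_keys _ hnd [], List.foldl_map, List.foldl_flatMap]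
  simp only [positions_getD]

lemma candL_sound {s : String} {pc : Int × Int} (h : pc ∈ sgCandL s) :
    ∃ pn cn : Nat, pc = ((pn : Int), (cn : Int)) ∧ IsCand s.toList pn cn := by
  obtain ⟨a, b⟩ := pc
  rw [sgCandL, List.mem_flatMap] at h
  obtain ⟨ch, hch, hzip⟩ := h
  obtain ⟨ha, hb, hab, hbet⟩ := (mem_zip_tail_iff (sgOcc_pairwise _ _)).mp hzip
  obtain ⟨pn, rfl, hpl, hpc⟩ := mem_sgOcc.mp ha
  obtain ⟨cn, rfl, hcl, hcc⟩ := mem_sgOcc.mp hb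
  have hplt : pn < cn := by exact_mod_cast hab
  refine ⟨pn, cn, rfl, hplt, hcl, by rw [hpc, hcc], ?_⟩
  intro q h1 h2 heq
  rw [hcc] at heq
  have hql : q < s.toList.length := by omega
  have hqm : (q : Int) ∈ sgOcc s.toList ch := mem_sgOcc.mpr ⟨q, rfl, hql, heq⟩
  exact hbet _ hqm ⟨by exact_mod_cast h1, by exact_mod_cast h2⟩

lemma candL_complete {s : String} {pn cn : Nat} (h : IsCand s.toList pn cn) :
    ((pn : Int), (cn : Int)) ∈ sgCandL s := by
  obtain ⟨hplt, hcl, heq, hbet⟩ := h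
  have hpl : pn < s.toList.length := by omega
  have hcc : s.toList[cn]? = some s.toList[cn] := List.getElem?_eq_getElem hcl
  have hpc : s.toList[pn]? = some s.toList[cn] := by rw [heq, hcc]
  have hkeys : ∀ c : Char, c ∈ (sgPositions s).keys ↔ c ∈ s.toList := by
    intro c
    unfold sgPositions
    rw [PySem.Dict.keys_foldl_modify_key]
    rw [PySem.Set.mem_update]
    simp [PySem.List.map_snd_enumerate]
  rw [sgCandL, List.mem_flatMap]
  refine ⟨s.toList[cn], (hkeys _).mpr (List.getElem_mem hcl), ?_⟩
  refine (mem_zip_tail_iff (sgOcc_pairwise _ _)).mpr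
    ⟨mem_sgOcc.mpr ⟨pn, rfl, hpl, hpc⟩, mem_sgOcc.mpr ⟨cn, rfl, hcl, hcc⟩,
      by exact_mod_cast hplt, ?_⟩
  rintro x hx ⟨h1, h2⟩
  obtain ⟨m, rfl, hml, hmc⟩ := mem_sgOcc.mp hx
  have hm1 : pn < m := by exact_mod_cast h1
  have hm2 : m < cn := by exact_mod_cast h2
  exact hbet m hm1 hm2 (by rw [hmc, hcc])

def sgGood (L : List (Int × Int)) (r : Int × Int × Int) : Prop :=
  (∃ pc ∈ L, r = (pc.2 - pc.1 - 1, pc.2, pc.1)) ∧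
  ∀ pc ∈ L, r.1 < pc.2 - pc.1 - 1 ∨ (r.1 = pc.2 - pc.1 - 1 ∧ r.2.1 ≤ pc.2)

lemma fold_good : ∀ (L P : List (Int × Int)) (b : Option (Int × Int × Int)),
    (b = none ∧ P = [] ∨ ∃ r, b = some r ∧ sgGood P r) →
    (L.foldl sgBestStep b = none ∧ P ++ L = []) ∨
      ∃ r, L.foldl sgBestStep b = some r ∧ sgGood (P ++ L) r := by
  intro L
  induction L with
  | nil =>
    intro P b h
    rcases h with ⟨rfl, rfl⟩ | ⟨r, rfl, hg⟩
    · exact Or.inl ⟨rfl, rfl⟩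
    · exact Or.inr ⟨r, rfl, by simpa using hg⟩
  | cons pc L ih =>
    intro P b h
    rw [List.foldl_cons]
    have hstep : ∃ r', sgBestStep b pc = some r' ∧ sgGood (P ++ [pc]) r' := by
      rcases h with ⟨rfl, rfl⟩ | ⟨r, rfl, hg⟩
      · refine ⟨(pc.2 - pc.1 - 1, pc.2, pc.1), rfl, ⟨pc, by simp, rfl⟩, ?_⟩
        intro pc' hm
        rw [List.nil_append, List.mem_singleton] at hm
        subst hm
        exact Or.inr ⟨rfl, le_refl _⟩
      · have hifeq : sgBestStep (some r) pc =
            if pc.2 - pc.1 - 1 < r.1 ∨ (pc.2 - pc.1 - 1 = r.1 ∧ pc.2 < r.2.1)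
            then some (pc.2 - pc.1 - 1, pc.2, pc.1) else some r := rfl
        by_cases hbet : pc.2 - pc.1 - 1 < r.1 ∨ (pc.2 - pc.1 - 1 = r.1 ∧ pc.2 < r.2.1)
        · refine ⟨(pc.2 - pc.1 - 1, pc.2, pc.1), by rw [hifeq, if_pos hbet],
            ⟨pc, by simp, rfl⟩, ?_⟩
          intro pc' hm
          rcases List.mem_append.mp hm with hm' | hm'
          · have := hg.2 pc' hm'
            rcases this with h' | ⟨h'1, h'2⟩ <;> rcases hbet with hb' | ⟨hb'1, hb'2⟩ <;>
              simp only [] <;> omega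
          · rw [List.mem_singleton] at hm'
            subst hm'
            exact Or.inr ⟨rfl, le_refl _⟩
        · refine ⟨r, by rw [hifeq, if_neg hbet], ?_, ?_⟩
          · obtain ⟨pc0, hm0, he0⟩ := hg.1
            exact ⟨pc0, List.mem_append_left _ hm0, he0⟩
          · intro pc' hm
            rcases List.mem_append.mp hm with hm' | hm'
            · exact hg.2 pc' hm'
            · rw [List.mem_singleton] at hm'
              subst hm'
              rw [not_or, not_and_or] at hbet
              rcases hbet with ⟨hb1, hb2⟩
              rcases hb2 with hb2 | hb2 <;> omega
    obtain ⟨r', heq, hgood⟩ := hstep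
    rw [heq]
    have hres := ih (P ++ [pc]) (some r') (Or.inr ⟨r', rfl, hgood⟩)
    simpa using hres

lemma B_none {s : String} (h : sgBest s = none) : NoCand s.toList s.toList.length := by
  have h2 := fold_good (sgCandL s) [] none (Or.inl ⟨rfl, rfl⟩)
  rw [← sgBest_eq_fold_candL] at h2
  rcases h2 with ⟨-, hnil⟩ | ⟨r, heq, -⟩
  · rw [List.nil_append] at hnil
    intro p c _ hic
    have hm := candL_complete hic
    rw [hnil] at hm
    exact absurd hm (List.not_mem_nil)
  · rw [h] at heq
    exact absurd heq (by simp)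

lemma B_some {s : String} {r : Int × Int × Int} (h : sgBest s = some r) :
    ∃ cn pn : Nat, r.2.1 = (cn : Int) ∧ r.2.2 = (pn : Int) ∧
      CandMin s.toList s.toList.length r.1 cn pn := by
  have h2 := fold_good (sgCandL s) [] none (Or.inl ⟨rfl, rfl⟩)
  rw [← sgBest_eq_fold_candL, h] at h2
  rcases h2 with ⟨habs, -⟩ | ⟨r', heq, hgood⟩
  · exact absurd habs (by simp)
  · obtain rfl : r' = r := (Option.some.inj heq).symm
    rw [List.nil_append] at hgood
    obtain ⟨⟨pc, hmem, hreq⟩, hmin⟩ := hgood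
    obtain ⟨pn, cn, rfl, hic⟩ := candL_sound hmem
    subst hreq
    refine ⟨cn, pn, rfl, rfl, hic, hic.2.1, rfl, ?_⟩
    intro p' c' hic' _
    have hm := hmin _ (candL_complete hic')
    simp only [] at hm ⊢
    rcases hm with h' | ⟨h'1, h'2⟩
    · exact Or.inl h'
    · exact Or.inr ⟨h'1, by exact_mod_cast h'2⟩

-- ===== VERDICT (by name: the statement is the Claim_ definition above) =====
theorem smallest_gap_spec : Claim_equal_smallest_gap := by
  intro s _
  unfold Spec_smallest_gap
  obtain ⟨mg, hA⟩ := A_char s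
  unfold smallest_gap_alt
  cases h : sgBest s with
  | none =>
    have hnc := B_none h
    rcases hA with ⟨_, _, hres⟩ | ⟨g, c, p, hcm, _, _⟩
    · simp [hres]
    · exact absurd hcm.1 (hnc p c hcm.1.2.1)
  | some r =>
    obtain ⟨cn, pn, hc, hp, hcm⟩ := B_some h
    rcases hA with ⟨hnc, _, _⟩ | ⟨g, c, p, hcm', _, hres⟩
    · exact absurd hcm.1 (hnc pn cn hcm.1.2.1)
    · obtain ⟨hg, hce, hpe⟩ := CandMin_unique hcm' hcm
      simp only [hres, hce, hpe, hc, hp]
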